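-- pv_equiv track=rewrite | github.com/vvangpc/mark123 | main_window.py | _longest_nonspace_run
-- ===== SOURCE A (Python) =====
-- def _longest_nonspace_run(s: str) -> str:
--     """从字符串中抽取最长的一段连续非空白字符（用作搜索锚点）。"""
--     if not s:
--         return ""
--     best = ""
--     cur_start = -1
--     for i, ch in enumerate(s):
--         if ch.isspace():
--             if cur_start >= 0:
--                 seg = s[cur_start:i]
--                 if len(seg) > len(best):
--                     best = seg
--                 cur_start = -1
--         else:
--             if cur_start < 0:
--                 cur_start = i
--     if cur_start >= 0:
--         seg = s[cur_start:]
--         if len(seg) > len(best):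
--             best = seg
--     return best
-- ===== SOURCE B (Python) =====
-- def _longest_nonspace_run(s: str) -> str:
--     """从字符串中抽取最长的一段连续非空白字符（用作搜索锚点）。"""
--     return max(s.split(), key=len, default="")
-- ===== Notes on version B (the rewrite author's own statement) =====
-- stated objective: idiomatic
-- what changed: Replaces the manual index-tracking scan (cur_start/best with slicing) by tokenize-then-reduce: s.split() yields all whitespace-separated runs and max with key=len and an empty-string default picks the first longest one.
import Mathlib
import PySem

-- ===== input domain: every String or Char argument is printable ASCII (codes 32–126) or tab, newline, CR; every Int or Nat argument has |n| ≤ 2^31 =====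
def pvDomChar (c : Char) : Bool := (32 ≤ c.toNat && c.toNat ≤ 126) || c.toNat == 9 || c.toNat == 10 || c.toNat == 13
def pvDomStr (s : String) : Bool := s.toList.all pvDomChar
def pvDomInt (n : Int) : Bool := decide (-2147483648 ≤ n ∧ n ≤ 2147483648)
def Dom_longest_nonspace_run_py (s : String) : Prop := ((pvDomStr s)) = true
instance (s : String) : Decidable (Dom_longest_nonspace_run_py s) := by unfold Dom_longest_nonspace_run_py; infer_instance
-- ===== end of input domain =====

-- B replaces A's manual index-tracking scan by tokenize-then-reduce (s.split(); max by len, default ""); same result, more idiomatic.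

-- ===== PORT A =====
-- loop body of A's `for i, ch in enumerate(s)` (state = (best, cur_start))
def pvStepA (cs : List Char) (st : List Char × Int) (p : Int × Char) : List Char × Int :=
  if PySem.Chars.isspace p.2 then
    if st.2 ≥ 0 then
      let seg := PySem.List.slice cs (some st.2) (some p.1)
      if seg.length > st.1.length then (seg, -1) else (st.1, -1)
    else st
  else
    if st.2 < 0 then (st.1, p.1) else st

-- A's trailing `if cur_start >= 0: …` block after the loop
def pvFinishA (cs : List Char) (st : List Char × Int) : List Char :=
  if st.2 ≥ 0 then
    let seg := PySem.List.slice cs (some st.2) none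
    if seg.length > st.1.length then seg else st.1
  else st.1

def longest_nonspace_run_py (s : String) : String :=
  if s = "" then ""
  else
    String.ofList
      (pvFinishA s.toList
        ((PySem.List.enumerate s.toList 0).foldl (pvStepA s.toList) ([], -1)))

-- ===== PORT B =====
def longest_nonspace_run_py_alt (s : String) : String :=
  PySem.List.maxD (PySem.Str.split₀ s) PySem.Str.len ""

-- ===== PRECONDITION & SPEC =====
def Spec_longest_nonspace_run_py (s : String) (out : String) : Prop := out = longest_nonspace_run_py_alt s
instance (s : String) (out : String) : Decidable (Spec_longest_nonspace_run_py s out) := by unfold Spec_longest_nonspace_run_py; infer_instance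

-- ===== CLAIM (what is proved, stated in full; the proofs are below) =====
def Claim_equal_longest_nonspace_run_py : Prop := ∀ (s : String), Dom_longest_nonspace_run_py s → Spec_longest_nonspace_run_py s (longest_nonspace_run_py s)

-- ===== LEMMAS AND PROOFS =====

-- abstract form of A's loop: state = (best, current run of non-space chars)
def pvRunA : List Char → List Char → List Char → List Char
  | [], best, cur => if best.length < cur.length then cur else best
  | c :: rest, best, cur =>
    if PySem.Chars.isspace c then
      pvRunA rest (if best.length < cur.length then cur else best) []
    else pvRunA rest best (cur ++ [c])

-- "pick the longest, first wins ties" fold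
def pvBestOf (best : List Char) (ts : List (List Char)) : List Char :=
  ts.foldl (fun b t => if b.length < t.length then t else b) best

lemma pvGo_acc (rest : List Char) : ∀ (cur : List Char) (acc : List (List Char)),
    PySem.Chars.split₀.go rest cur acc = acc.reverse ++ PySem.Chars.split₀.go rest cur [] := by
  induction rest with
  | nil =>
    intro cur acc
    simp only [PySem.Chars.split₀.go]
    by_cases h : cur.isEmpty <;> simp [h]
  | cons c rest ih =>
    intro cur acc
    simp only [PySem.Chars.split₀.go]
    by_cases hs : PySem.Chars.isspace c <;> by_cases h : cur.isEmpty <;>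
      simp [hs, h, ih [] acc, ih [] (cur.reverse :: acc), ih [] [cur.reverse], ih (c :: cur) acc]

lemma pvRunA_eq_bestOf (rest : List Char) : ∀ (best cur : List Char),
    pvRunA rest best cur = pvBestOf best (PySem.Chars.split₀.go rest cur.reverse []) := by
  induction rest with
  | nil =>
    intro best cur
    simp only [pvRunA, PySem.Chars.split₀.go, List.isEmpty_reverse]
    by_cases h : cur.isEmpty
    · simp [h, List.isEmpty_iff.mp h, pvBestOf]
    · simp [h, pvBestOf]
  | cons c rest ih =>
    intro best cur
    simp only [pvRunA, PySem.Chars.split₀.go, List.isEmpty_reverse]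
    by_cases hs : PySem.Chars.isspace c
    · by_cases h : cur.isEmpty
      · simp [hs, h, List.isEmpty_iff.mp h, ih best []]
      · simp only [hs, if_true, h, Bool.false_eq_true, if_false, ih _ [], List.reverse_nil,
          pvBestOf, List.reverse_reverse]
        rw [pvGo_acc rest [] [cur]]
        simp
    · have hrev : (cur ++ [c]).reverse = c :: cur.reverse := by simp
      simp [hs, ih best (cur ++ [c]), hrev]

-- simulation: A's indexed fold + trailing block over the suffix `rest` equals pvRunA,
-- the index state encoding the current run as a suffix of the processed prefix `pre`.
lemma pvSimA (rest : List Char) : ∀ (pre best : List Char) (st : Int) (cur : List Char),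
    ((st = -1 ∧ cur = []) ∨ (∃ k : Nat, st = (k : Int) ∧ k ≤ pre.length ∧ cur = pre.drop k)) →
    pvFinishA (pre ++ rest)
        ((PySem.List.enumerate rest (pre.length : Int)).foldl (pvStepA (pre ++ rest)) (best, st))
      = pvRunA rest best cur := by
  induction rest with
  | nil =>
    intro pre best st cur h
    rcases h with ⟨h1, h2⟩ | ⟨k, hk, hkle, hcur⟩
    · subst h1; subst h2
      simp [pvFinishA, pvRunA, PySem.List.enumerate_nil]
    · subst hk; subst hcur
      have hslice : PySem.List.slice (pre ++ []) (some (k : Int)) none = pre.drop k := by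
        simpa using PySem.List.slice_from_natCast (pre ++ []) k
      simp only [PySem.List.enumerate_nil, List.foldl_nil, pvFinishA, pvRunA, hslice]
      rw [if_pos (by omega : ((k : Int) ≥ 0))]
  | cons c rest ih =>
    intro pre best st cur h
    rw [PySem.List.enumerate_cons, List.foldl_cons]
    have happ : pre ++ c :: rest = (pre ++ [c]) ++ rest := by simp
    have hlen : ((pre.length : Int) + 1) = (((pre ++ [c]).length : Nat) : Int) := by simp
    rcases h with ⟨h1, h2⟩ | ⟨k, hk, hkle, hcur⟩
    · subst h1; subst h2
      by_cases hs : PySem.Chars.isspace c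
      · have hstep : pvStepA (pre ++ c :: rest) (best, -1) ((pre.length : Int), c) = (best, -1) := by
          simp [pvStepA, hs]
        rw [hstep, happ, hlen]
        rw [ih (pre ++ [c]) best (-1) [] (Or.inl ⟨rfl, rfl⟩)]
        simp [pvRunA, hs]
      · have hstep : pvStepA (pre ++ c :: rest) (best, -1) ((pre.length : Int), c)
            = (best, (pre.length : Int)) := by
          simp [pvStepA, hs]
        rw [hstep, happ, hlen]
        rw [ih (pre ++ [c]) best (pre.length : Int) [c]
          (Or.inr ⟨pre.length, rfl, by simp, by simp⟩)]
        simp [pvRunA, hs]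
    · subst hk; subst hcur
      by_cases hs : PySem.Chars.isspace c
      · have hslice : PySem.List.slice (pre ++ c :: rest) (some (k : Int)) (some ((pre.length : Nat) : Int))
            = pre.drop k := by
          rw [PySem.List.slice_natCast, List.drop_append_of_le_length hkle]
          exact List.take_left' (by simp)
        have hstep : pvStepA (pre ++ c :: rest) (best, (k : Int)) ((pre.length : Int), c)
            = ((if best.length < (pre.drop k).length then pre.drop k else best), -1) := by
          simp only [pvStepA, hs, if_pos rfl]
          rw [if_pos (by omega : ((k : Int) ≥ 0)), hslice]
          split_ifs <;> rfl
        rw [hstep, happ, hlen]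
        rw [ih (pre ++ [c]) (if best.length < (pre.drop k).length then pre.drop k else best)
          (-1) [] (Or.inl ⟨rfl, rfl⟩)]
        simp [pvRunA, hs]
      · have hstep : pvStepA (pre ++ c :: rest) (best, (k : Int)) ((pre.length : Int), c)
            = (best, (k : Int)) := by
          simp only [pvStepA, hs, Bool.false_eq_true, if_false]
          rw [if_neg (by omega : ¬ ((k : Int) < 0))]
        rw [hstep, happ, hlen]
        rw [ih (pre ++ [c]) best (k : Int) ((pre ++ [c]).drop k)
          (Or.inr ⟨k, rfl, by simp; omega, rfl⟩)]
        rw [List.drop_append_of_le_length hkle]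
        simp [pvRunA, hs]

-- B's max-fold over the String tokens mirrors pvBestOf over the Char-list tokens
lemma pvMaxFold (ts : List (List Char)) : ∀ (b : List Char),
    PySem.List.max? ((b :: ts).map String.ofList) PySem.Str.len
      = some (String.ofList (pvBestOf b ts)) := by
  induction ts with
  | nil => intro b; simp [PySem.List.max?, pvBestOf]
  | cons t ts ih =>
    intro b
    simp only [PySem.List.max?, List.map_cons, List.foldl_cons] at ih ⊢
    simp only [PySem.Str.len, String.toList_ofList] at ih ⊢
    by_cases h : b.length < t.length
    · rw [if_pos (show ((b.length : Int) < (t.length : Int)) by exact_mod_cast h)]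
      simpa [pvBestOf, h] using ih t
    · rw [if_neg (show ¬ ((b.length : Int) < (t.length : Int)) by exact_mod_cast h)]
      simpa [pvBestOf, h] using ih b

lemma pvBestOf_nil_cons (t : List Char) (ts : List (List Char)) :
    pvBestOf [] (t :: ts) = pvBestOf t ts := by
  rcases t with _ | ⟨c, t⟩ <;> simp [pvBestOf]

lemma pvAlt_eq (s : String) :
    longest_nonspace_run_py_alt s = String.ofList (pvBestOf [] (PySem.Chars.split₀ s.toList)) := by
  unfold longest_nonspace_run_py_alt
  rw [PySem.Str.split₀]
  unfold PySem.List.maxD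
  rcases h : PySem.Chars.split₀ s.toList with _ | ⟨t, ts⟩
  · simp [PySem.List.max?, pvBestOf]
  · rw [pvMaxFold ts t, pvBestOf_nil_cons]
    rfl

-- ===== VERDICT (by name: the statement is the Claim_ definition above) =====
theorem longest_nonspace_run_py_spec : Claim_equal_longest_nonspace_run_py := by
  intro s _
  unfold Spec_longest_nonspace_run_py
  rw [pvAlt_eq]
  unfold longest_nonspace_run_py
  by_cases hs : s = ""
  · subst hs
    simp [PySem.Chars.split₀, PySem.Chars.split₀.go, pvBestOf]
  · rw [if_neg hs]
    have := pvSimA s.toList [] [] (-1) [] (Or.inl ⟨rfl, rfl⟩)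
    simp only [List.nil_append, List.length_nil, Nat.cast_zero] at this
    rw [this, pvRunA_eq_bestOf, PySem.Chars.split₀]
    rfl
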